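-- pv_equiv track=rewrite | github.com/alibaba/graph-gpt | src/utils/nx_utils.py | _reindex_node_singulars
-- ===== SOURCE A (Python) =====
-- from typing import List, Tuple, Dict, Union, Iterable
--
-- def _reindex_node_singulars(path: List[int]):
--     """
--     Re-index the node singulars in each path
--     :param path:
--     :return:
--     """
--     # 1. initialize the mapping
--     idx = 1  # 1st element starts from 1 instead of 0
--     dict_map = {}
--     for node in path:
--         if dict_map.get(node, None) is None:
--             dict_map[node] = idx
--             idx += 1
--     # 2. apply the mapping
--     new_path = [dict_map[node] for node in path]
--     return tuple(new_path)
-- ===== SOURCE B (Python) =====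
-- def _reindex_node_singulars(path):
--     """Positional characterization: the new index of each node is the number of
--     distinct values seen up to (and including) its first occurrence in path.
--     No mapping dict is built at all."""
--     return tuple(len(set(path[:path.index(node) + 1])) for node in path)
-- ===== Notes on version B (the rewrite author's own statement) =====
-- stated objective: simpler
-- what changed: Drops A's node->index dictionary entirely: B computes each output element directly from a positional characterization -- the rank of a node is the number of distinct values in the prefix of path ending at its first occurrence (len(set(path[:path.index(node)+1]))) -- a one-line quadratic formula instead of A's two-pass dict construction and application.
import Mathlib
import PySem

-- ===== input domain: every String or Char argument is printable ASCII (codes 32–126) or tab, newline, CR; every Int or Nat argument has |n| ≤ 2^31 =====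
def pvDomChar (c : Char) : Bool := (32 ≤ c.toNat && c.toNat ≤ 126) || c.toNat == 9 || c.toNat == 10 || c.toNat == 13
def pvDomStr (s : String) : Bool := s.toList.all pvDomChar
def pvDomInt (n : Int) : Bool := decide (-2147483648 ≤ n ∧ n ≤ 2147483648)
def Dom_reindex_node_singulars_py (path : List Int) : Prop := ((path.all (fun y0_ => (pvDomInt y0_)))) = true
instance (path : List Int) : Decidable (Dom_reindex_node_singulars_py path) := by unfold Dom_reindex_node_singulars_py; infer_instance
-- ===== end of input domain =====

-- B replaces A's dict pipeline by a direct positional formula (rank = number of distinct values up to the node's first occurrence); objective: simpler.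


-- ===== PORT A =====
-- step of A's first loop: state (dict_map, idx); insert when .get(node, None) is None
def pvStepA (s : PySem.Dict Int Int × Int) (node : Int) : PySem.Dict Int Int × Int :=
  if s.1.get? node = none then (s.1.insert node s.2, s.2 + 1) else s

def reindex_node_singulars_py (path : List Int) : List Int :=
  let st := path.foldl pvStepA (PySem.Dict.empty, 1)
  -- dict_map[node]: every node of path is a key of st.1, so the default 0 is never returned
  path.map (fun node => st.1.getD node 0)

-- ===== PORT B =====
def reindex_node_singulars_py_alt (path : List Int) : List Int :=
  path.map (fun node =>
    match PySem.List.index? path node with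
    | some j => PySem.Set.len (PySem.Set.ofList (PySem.List.slice path none (some ((j : Int) + 1))))
    | none => 0)  -- unreachable: node ∈ path, so path.index(node) always succeeds

-- ===== PRECONDITION & SPEC =====
def Spec_reindex_node_singulars_py (path : List Int) (out : List Int) : Prop := out = reindex_node_singulars_py_alt path
instance (path : List Int) (out : List Int) : Decidable (Spec_reindex_node_singulars_py path out) := by unfold Spec_reindex_node_singulars_py; infer_instance

-- ===== CLAIM =====
def Claim_equal_reindex_node_singulars_py : Prop := ∀ (path : List Int), Dom_reindex_node_singulars_py path → Spec_reindex_node_singulars_py path (reindex_node_singulars_py path)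

-- ===== LEMMAS AND PROOFS =====
-- Appending an already-seen element does not change set(…); a new element appends.
theorem pvOfList_append_mem (p : List Int) (n : Int) (hn : n ∈ p) :
    PySem.Set.ofList (p ++ [n]) = PySem.Set.ofList p := by
  rw [PySem.Set.ofList_eq_foldl, List.foldl_append, ← PySem.Set.ofList_eq_foldl]
  simp [PySem.Set.add, hn]

theorem pvOfList_append_not_mem (p : List Int) (n : Int) (hn : n ∉ p) :
    PySem.Set.ofList (p ++ [n]) = PySem.Set.ofList p ++ [n] := by
  rw [PySem.Set.ofList_eq_foldl, List.foldl_append, ← PySem.Set.ofList_eq_foldl]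
  simp [PySem.Set.add, hn]

-- Invariant of A's first loop: the counter is (#distinct)+1, and the dict maps k to the
-- number of distinct values in the prefix of p ending at k's first occurrence.
theorem pvFoldA_inv (p : List Int) :
    (p.foldl pvStepA (PySem.Dict.empty, 1)).2 = ((PySem.Set.ofList p).length : Int) + 1 ∧
    ∀ k, (p.foldl pvStepA (PySem.Dict.empty, 1)).1.get? k
        = (PySem.List.index? p k).map
            (fun j => ((PySem.Set.ofList (p.take (j + 1))).length : Int)) := by
  induction p using List.reverseRecOn with
  | nil =>
      constructor
      · rfl
      · intro k
        simp [PySem.Dict.empty, PySem.Dict.get?, PySem.List.index?]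
  | append_singleton p n ih =>
      obtain ⟨ihc, ihd⟩ := ih
      rw [List.foldl_append]
      simp only [List.foldl_cons, List.foldl_nil]
      by_cases hn : n ∈ p
      · -- n already seen: the step does nothing
        obtain ⟨j, hj⟩ := Option.isSome_iff_exists.mp
          ((PySem.List.index?_isSome_iff p n).mpr hn)
        have hget : (p.foldl pvStepA (PySem.Dict.empty, 1)).1.get? n ≠ none := by
          rw [ihd n, hj]; simp
        have hstep : pvStepA (p.foldl pvStepA (PySem.Dict.empty, 1)) n
            = p.foldl pvStepA (PySem.Dict.empty, 1) := by
          unfold pvStepA; split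
          · exact absurd (by assumption) hget
          · rfl
        rw [hstep, pvOfList_append_mem p n hn]
        refine ⟨ihc, fun k => ?_⟩
        by_cases hk : k ∈ p
        · rw [PySem.List.index?_append_of_mem _ hk, ihd k]
          obtain ⟨i, hi⟩ := Option.isSome_iff_exists.mp
            ((PySem.List.index?_isSome_iff p k).mpr hk)
          obtain ⟨hlt, -, -⟩ := PySem.List.getElem_of_index?_eq_some hi
          rw [hi]
          simp only [Option.map_some]
          rw [List.take_append_of_le_length (by omega)]
        · have h1 : PySem.List.index? p k = none :=
            (PySem.List.index?_eq_none_iff _ _).mpr hk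
          have h2 : PySem.List.index? (p ++ [n]) k = none := by
            refine (PySem.List.index?_eq_none_iff _ _).mpr ?_
            simp only [List.mem_append, List.mem_singleton]
            rintro (h | rfl)
            · exact hk h
            · exact hk hn
          rw [h2, ihd k, h1]; rfl
      · -- n is new: the step inserts it with value = idx = (#distinct p)+1
        have hget : (p.foldl pvStepA (PySem.Dict.empty, 1)).1.get? n = none := by
          rw [ihd n, (PySem.List.index?_eq_none_iff _ _).mpr hn]; rfl
        have hstep : pvStepA (p.foldl pvStepA (PySem.Dict.empty, 1)) n
            = ((p.foldl pvStepA (PySem.Dict.empty, 1)).1.insert n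
                 (p.foldl pvStepA (PySem.Dict.empty, 1)).2,
               (p.foldl pvStepA (PySem.Dict.empty, 1)).2 + 1) := by
          simp only [pvStepA]; rw [if_pos hget]
        rw [hstep, pvOfList_append_not_mem p n hn]
        constructor
        · simp only [List.length_append, List.length_cons, List.length_nil]
          rw [ihc]; push_cast; ring
        · intro k
          by_cases hkn : k = n
          · subst hkn
            rw [PySem.Dict.get?_insert_self, ihc,
                PySem.List.index?_append_singleton_self _ _ hn]
            simp only [Option.map_some]
            rw [List.take_of_length_le (by simp)]
            rw [pvOfList_append_not_mem p k hn]
            simp only [List.length_append, List.length_cons, List.length_nil]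
            push_cast; ring_nf
          · rw [PySem.Dict.get?_insert]
            rw [if_neg (by simpa using hkn)]
            by_cases hk : k ∈ p
            · rw [PySem.List.index?_append_of_mem _ hk, ihd k]
              obtain ⟨i, hi⟩ := Option.isSome_iff_exists.mp
                ((PySem.List.index?_isSome_iff p k).mpr hk)
              obtain ⟨hlt, -, -⟩ := PySem.List.getElem_of_index?_eq_some hi
              rw [hi]
              simp only [Option.map_some]
              rw [List.take_append_of_le_length (by omega)]
            · have h1 : PySem.List.index? p k = none :=
                (PySem.List.index?_eq_none_iff _ _).mpr hk
              have h2 : PySem.List.index? (p ++ [n]) k = none := by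
                refine (PySem.List.index?_eq_none_iff _ _).mpr ?_
                simp only [List.mem_append, List.mem_singleton]
                rintro (h | rfl)
                · exact hk h
                · exact hkn rfl
              rw [h2, ihd k, h1]; rfl

-- ===== VERDICT =====
theorem reindex_node_singulars_py_spec : Claim_equal_reindex_node_singulars_py := by
  intro path _
  unfold Spec_reindex_node_singulars_py reindex_node_singulars_py reindex_node_singulars_py_alt
  apply List.map_congr_left
  intro node hmem
  obtain ⟨j, hj⟩ := Option.isSome_iff_exists.mp
    ((PySem.List.index?_isSome_iff path node).mpr hmem)
  rw [PySem.Dict.getD_eq_get?_getD, (pvFoldA_inv path).2 node, hj]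
  simp only [Option.map_some, Option.getD_some]
  have : ((j : Int) + 1) = ((j + 1 : Nat) : Int) := by push_cast; ring
  rw [this, PySem.List.slice_to_natCast]
  rfl
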